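-- pv_equiv track=rewrite | github.com/skfo763/Problem_Solving | psroadmap/bruteforce/1748.py | f
-- ===== SOURCE A (Python) =====
-- def f(num, k):
--     if k == 0:
--         return 0
--     else:
--         if num >= 10 ** k:
--             val = 9 * (10**(k-1))
--         else:
--             val = num - (10 ** (k-1)) + 1
--     return f(num, k-1) + (k * val)
-- ===== SOURCE B (Python) =====
-- def f(num, k):
--     total = 0
--     for i in range(1, k + 1):
--         if num >= 10 ** i:
--             val = 9 * 10 ** (i - 1)
--         else:
--             val = num - 10 ** (i - 1) + 1
--         total += i * val
--     return total
-- ===== Notes on version B (the rewrite author's own statement) =====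
-- stated objective: simpler
-- what changed: Replaced the top-down recursion over k with a bottom-up iterative accumulator loop over digit-lengths 1..k.
import Mathlib
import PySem

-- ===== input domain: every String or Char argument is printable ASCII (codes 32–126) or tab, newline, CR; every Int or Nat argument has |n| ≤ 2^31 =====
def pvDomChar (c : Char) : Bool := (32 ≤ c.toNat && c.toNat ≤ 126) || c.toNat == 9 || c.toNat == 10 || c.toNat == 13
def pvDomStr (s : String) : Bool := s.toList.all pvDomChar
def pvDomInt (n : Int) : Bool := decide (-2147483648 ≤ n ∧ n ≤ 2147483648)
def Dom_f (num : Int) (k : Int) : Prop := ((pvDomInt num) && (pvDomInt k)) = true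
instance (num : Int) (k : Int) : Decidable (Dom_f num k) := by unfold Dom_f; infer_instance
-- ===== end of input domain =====

-- B replaces A's top-down recursion with a bottom-up accumulator loop over digit-lengths 1..k (simpler, no recursion).


-- ===== PORT A =====
-- literal port of A's recursion; the k < 0 guard is unreachable under Pre_f
-- (in Python, k < 0 recurses without a base case and raises RecursionError)
def f (num : Int) (k : Int) : Int :=
  if k = 0 then 0
  else if k < 0 then 0
  else
    let val := if num ≥ 10 ^ k.toNat then 9 * 10 ^ (k - 1).toNat
               else num - 10 ^ (k - 1).toNat + 1
    f num (k - 1) + k * val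
termination_by k.toNat
decreasing_by omega

-- ===== PORT B =====
def f_alt (num : Int) (k : Int) : Int :=
  (PySem.List.pyRange 1 (k + 1) 1).foldl
    (fun total i =>
      total + i * (if num ≥ 10 ^ i.toNat then 9 * 10 ^ (i - 1).toNat
                   else num - 10 ^ (i - 1).toNat + 1))
    0

-- ===== PRECONDITION & SPEC =====
-- Pre_f excludes k < 0, on which the Python A recurses forever (RecursionError).
def Pre_f (num : Int) (k : Int) : Prop := 0 ≤ k
instance (num : Int) (k : Int) : Decidable (Pre_f num k) := by unfold Pre_f; infer_instance
def pvWitness_f : Int × Int := (123, 3)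

def Spec_f (num : Int) (k : Int) (out : Int) : Prop := out = f_alt num k
instance (num : Int) (k : Int) (out : Int) : Decidable (Spec_f num k out) := by unfold Spec_f; infer_instance

-- ===== CLAIM (what is proved, stated in full; the proofs are below) =====
def Claim_equal_f : Prop := ∀ (num : Int) (k : Int), Dom_f num k → Pre_f num k → Spec_f num k (f num k)

-- ===== LEMMAS AND PROOFS =====

theorem f_eq_f_alt (num : Int) (k : Int) (hk : 0 ≤ k) : f num k = f_alt num k := by
  induction k, hk using Int.le_induction with
  | base =>
      rw [f]
      simp [f_alt, PySem.List.pyRange_one_eq_nil (le_refl (1 : Int))]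
  | succ k hk0 ih =>
      rw [f]
      have h1 : ¬ (k + 1 = 0) := by omega
      have h2 : ¬ (k + 1 < 0) := by omega
      have e : k + 1 - 1 = k := by ring
      have hr : PySem.List.pyRange 1 (k + 1 + 1) 1
          = PySem.List.pyRange 1 (k + 1) 1 ++ [k + 1] :=
        PySem.List.pyRange_one_succ_right (by omega)
      have hstep : f_alt num (k + 1)
          = f_alt num k + (k + 1) *
              (if num ≥ 10 ^ (k + 1).toNat then 9 * 10 ^ k.toNat
               else num - 10 ^ k.toNat + 1) := by
        unfold f_alt
        rw [hr, List.foldl_append, List.foldl_cons, List.foldl_nil, e]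
      simp only [h1, h2, if_false, e]
      rw [hstep, ih]

-- ===== VERDICT (by name: the statement is the Claim_ definition above) =====
theorem f_spec : Claim_equal_f := by
  intro num k _ hpre
  exact f_eq_f_alt num k hpre
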